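-- pv_equiv track=rewrite | github.com/RicNazar/toxt-p10_dbdriver | src/pyeasymatrixdb/subclasses/DbDriverUtils.py | expand_structure
-- ===== SOURCE A (Python) =====
-- from typing import Any, Dict, List, Tuple, TypedDict
--
-- class ColumnDefinition(TypedDict):
--     type: Any
--     primary: bool
--     unique: bool
--     default: Any
--     nullable: bool
--     table_obj: Any
--     column_obj: Any
--
-- def expand_structure(
--     columns_definitions: Dict[str, Dict[str, ColumnDefinition]],
--     matrix: List[List[Any]],
--     include_md: bool = False,
-- ) -> Tuple[List[Any], List[Any], List[int]]:
--     if not matrix or len(matrix) < 2: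
--         raise ValueError("Matriz inválida. É necessário ter ao menos 2 linhas.")
--
--     src_tables = list(matrix[0])
--     src_headers = list(matrix[1])
--     src_pairs = [(src_tables[i], src_headers[i]) for i in range(min(len(src_tables), len(src_headers)))]
--
--     has_md = "MD" in src_headers
--     md_idx = src_headers.index("MD") if has_md else -1
--
--     tables_in_order: List[str] = []
--     for t in src_tables:
--         if t not in tables_in_order and t in columns_definitions:
--             tables_in_order.append(t)
--
--     target_tables: List[Any] = []
--     target_headers: List[Any] = []
--     for t in tables_in_order:
--         for col_name in columns_definitions[t].keys():
--             target_tables.append(t)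
--             target_headers.append(col_name)
--
--     if include_md and has_md:
--         target_tables.append(src_tables[md_idx])
--         target_headers.append("MD")
--
--     source_index_map: List[int] = []
--     for i in range(len(target_headers)):
--         target_pair = (target_tables[i], target_headers[i])
--         idx = next((j for j, pair in enumerate(src_pairs) if pair == target_pair), -1)
--         source_index_map.append(idx)
--
--     return target_tables, target_headers, source_index_map
-- ===== SOURCE B (Python) =====
-- from typing import Any, Dict, List, Tuple
--
-- def expand_structure(
--     columns_definitions,
--     matrix,
--     include_md: bool = False,
-- ):
--     if not matrix or len(matrix) < 2:
--         raise ValueError("Matriz inválida. É necessário ter ao menos 2 linhas.")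
--
--     src_tables = list(matrix[0])
--     src_headers = list(matrix[1])
--     src_pairs = list(zip(src_tables, src_headers))
--
--     has_md = "MD" in src_headers
--
--     tables_in_order = []
--     for t in src_tables:
--         if t not in tables_in_order and t in columns_definitions:
--             tables_in_order.append(t)
--
--     target_tables = []
--     target_headers = []
--     for t in tables_in_order:
--         for col_name in columns_definitions[t].keys():
--             target_tables.append(t)
--             target_headers.append(col_name)
--
--     if include_md and has_md:
--         target_tables.append(src_tables[src_headers.index("MD")])
--         target_headers.append("MD")
--
--     # Inverted traversal: group the target slots by their (table, header) pair,
--     # then scan the source pairs once, scattering each source index into every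
--     # still-unfilled target slot for that pair (earliest source index wins).
--     target_positions = {}
--     for i, pair in enumerate(zip(target_tables, target_headers)):
--         target_positions.setdefault(pair, []).append(i)
--
--     source_index_map = [-1] * len(target_headers)
--     for j, pair in enumerate(src_pairs):
--         for i in target_positions.get(pair, []):
--             if source_index_map[i] == -1:
--                 source_index_map[i] = j
--
--     return target_tables, target_headers, source_index_map
-- ===== Notes on version B (the rewrite author's own statement) =====
-- stated objective: alternative
-- what changed: The source-index map is built by an inverted traversal: target slots are grouped by (table,header) pair into a positions dict, then a single forward pass over src_pairs scatters each source index into every still-unfilled target slot, instead of A's per-target-column linear scan of src_pairs.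
import Mathlib
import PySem

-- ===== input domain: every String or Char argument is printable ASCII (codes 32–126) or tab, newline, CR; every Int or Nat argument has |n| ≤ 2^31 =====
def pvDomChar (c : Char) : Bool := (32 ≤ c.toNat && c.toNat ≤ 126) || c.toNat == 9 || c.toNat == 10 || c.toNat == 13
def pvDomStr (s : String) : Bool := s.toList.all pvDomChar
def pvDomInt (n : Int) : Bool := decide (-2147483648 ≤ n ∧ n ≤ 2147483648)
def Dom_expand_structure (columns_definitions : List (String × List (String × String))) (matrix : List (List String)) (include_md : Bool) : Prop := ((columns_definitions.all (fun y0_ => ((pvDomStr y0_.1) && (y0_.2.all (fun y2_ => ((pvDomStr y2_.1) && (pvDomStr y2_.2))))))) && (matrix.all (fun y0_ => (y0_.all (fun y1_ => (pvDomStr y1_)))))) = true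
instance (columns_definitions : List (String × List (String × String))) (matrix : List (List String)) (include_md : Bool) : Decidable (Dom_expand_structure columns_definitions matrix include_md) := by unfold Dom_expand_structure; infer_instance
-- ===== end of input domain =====

-- B inverts A's index-map traversal: instead of scanning src_pairs once per target column,
-- it groups target slots by pair in a positions dict and scatters source indices into the
-- still-unfilled slots in one forward pass over src_pairs (objective: alternative).

-- ===== PORT A =====
def expand_structure (columns_definitions : List (String × List (String × String))) (matrix : List (List String)) (include_md : Bool) : List String × List String × List Int :=
  match matrix with
  | src_tables :: src_headers :: _ =>
    -- src_pairs = [(src_tables[i], src_headers[i]) for i in range(min(len,len))]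
    let src_pairs : List (String × String) :=
      (List.range (min src_tables.length src_headers.length)).map
        (fun i => (src_tables.getD i "", src_headers.getD i ""))
    let has_md : Bool := src_headers.contains "MD"
    let md_idx : Int := if has_md then ((PySem.List.index? src_headers "MD").getD 0 : Nat) else -1
    let tables_in_order : List String :=
      src_tables.foldl
        (fun acc t => if !acc.contains t && (PySem.Dict.mk columns_definitions).contains t then acc ++ [t] else acc) []
    let targets : List String × List String :=
      tables_in_order.foldl
        (fun p t =>
          (((PySem.Dict.mk columns_definitions).getD t []).map (·.1)).foldl
            (fun q col_name => (q.1 ++ [t], q.2 ++ [col_name])) p)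
        ([], [])
    let targets : List String × List String :=
      if include_md && has_md then
        (targets.1 ++ [(PySem.List.pyGet? src_tables md_idx).getD ""], targets.2 ++ ["MD"])
      else targets
    -- per-target scan: next((j for j, pair in enumerate(src_pairs) if pair == target_pair), -1)
    let source_index_map : List Int :=
      (List.range targets.2.length).map (fun i =>
        let target_pair := (targets.1.getD i "", targets.2.getD i "")
        (src_pairs.findIdx? (fun pair => pair == target_pair)).elim (-1 : Int) (fun j => (j : Int)))
    (targets.1, targets.2, source_index_map)
  | _ => ([], [], [])  -- ValueError in Python; excluded by Pre_

-- ===== PORT B =====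
def expand_structure_alt (columns_definitions : List (String × List (String × String))) (matrix : List (List String)) (include_md : Bool) : List String × List String × List Int :=
  if matrix.length < 2 then ([], [], [])  -- ValueError in Python; excluded by Pre_
  else
    let src_tables : List String := matrix.getD 0 []
    let src_headers : List String := matrix.getD 1 []
    let src_pairs : List (String × String) := src_tables.zip src_headers
    let has_md : Bool := src_headers.contains "MD"
    let tables_in_order : List String :=
      src_tables.foldl
        (fun acc t => if !acc.contains t && (PySem.Dict.mk columns_definitions).contains t then acc ++ [t] else acc) []
    let targets : List String × List String :=
      tables_in_order.foldl
        (fun p t =>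
          (((PySem.Dict.mk columns_definitions).getD t []).map (·.1)).foldl
            (fun q col_name => (q.1 ++ [t], q.2 ++ [col_name])) p)
        ([], [])
    let targets : List String × List String :=
      if include_md && has_md then
        (targets.1 ++ [(PySem.List.pyGet? src_tables (((PySem.List.index? src_headers "MD").getD 0 : Nat) : Int)).getD ""],
         targets.2 ++ ["MD"])
      else targets
    -- target_positions: slot indices grouped by pair; 'for i, pair in enumerate(zip(...)): setdefault(pair, []).append(i)'
    -- ported with zipIdx (= enumerate as (elem, index) pairs) and Dict.modify (= d[p] = d.get(p, []) + [i])
    let target_positions : PySem.Dict (String × String) (List Nat) :=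
      ((targets.1.zip targets.2).zipIdx).foldl
        (fun d p => d.modify p.1 [] (· ++ [p.2])) PySem.Dict.empty
    -- scatter pass: 'for j, pair in enumerate(src_pairs): for i in positions: if map[i] == -1: map[i] = j'
    -- (the listed slot indices are always in range, so List.getD's default is never read)
    let source_index_map : List Int :=
      (src_pairs.zipIdx).foldl
        (fun m jp =>
          (target_positions.getD jp.1 []).foldl
            (fun m i => if m.getD i 0 = -1 then m.set i ((jp.2 : Nat) : Int) else m) m)
        (List.replicate targets.2.length (-1 : Int))
    (targets.1, targets.2, source_index_map)

-- ===== PRECONDITION & SPEC =====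
-- Pre_ excludes inputs where Python A raises: fewer than 2 rows (ValueError), and the case
-- where include_md holds, "MD" occurs in row 1 at a position ≥ len(row 0) (IndexError on src_tables[md_idx]).
def Pre_expand_structure (columns_definitions : List (String × List (String × String))) (matrix : List (List String)) (include_md : Bool) : Prop :=
  2 ≤ matrix.length ∧
  (include_md = true → "MD" ∈ matrix.getD 1 [] → (matrix.getD 1 []).idxOf "MD" < (matrix.getD 0 []).length)
instance (columns_definitions : List (String × List (String × String))) (matrix : List (List String)) (include_md : Bool) : Decidable (Pre_expand_structure columns_definitions matrix include_md) := by unfold Pre_expand_structure; infer_instance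
def pvWitness_expand_structure : (List (String × List (String × String))) × List (List String) × Bool :=
  ([("t", [("c1", "int"), ("c2", "str")])], [["t", "t", "u"], ["c2", "MD", "c1"]], true)

def Spec_expand_structure (columns_definitions : List (String × List (String × String))) (matrix : List (List String)) (include_md : Bool) (out : List String × List String × List Int) : Prop := out = expand_structure_alt columns_definitions matrix include_md
instance (columns_definitions : List (String × List (String × String))) (matrix : List (List String)) (include_md : Bool) (out : List String × List String × List Int) : Decidable (Spec_expand_structure columns_definitions matrix include_md out) := by unfold Spec_expand_structure; infer_instance

-- ===== CLAIM (what is proved, stated in full; the proofs are below) =====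
def Claim_equal_expand_structure : Prop := ∀ (columns_definitions : List (String × List (String × String))) (matrix : List (List String)) (include_md : Bool), Dom_expand_structure columns_definitions matrix include_md → Pre_expand_structure columns_definitions matrix include_md → Spec_expand_structure columns_definitions matrix include_md (expand_structure columns_definitions matrix include_md)

-- ===== LEMMAS AND PROOFS =====

-- a range-over-min index loop building f of the two getD's is a map over the zip
lemma rangeMin_map_eq_zip_map {α : Type} (tt th : List String) (f : String × String → α) :
    (List.range (min tt.length th.length)).map (fun i => f (tt.getD i "", th.getD i "")) =
      (tt.zip th).map f := by
  apply List.ext_getElem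
  · simp
  · intro i h1 h2
    simp only [List.getElem_map, List.getElem_range, List.getElem_zip]
    have hi : i < min tt.length th.length := by simpa using h1
    rw [List.getD_eq_getElem _ _ (by omega), List.getD_eq_getElem _ _ (by omega)]

-- the target-building fold keeps the two lists the same length
lemma targets_len_eq (columns_definitions : List (String × List (String × String)))
    (l : List String) (p : List String × List String) (h : p.1.length = p.2.length) :
    (l.foldl
        (fun p t =>
          (((PySem.Dict.mk columns_definitions).getD t []).map (·.1)).foldl
            (fun q col_name => (q.1 ++ [t], q.2 ++ [col_name])) p)
        p).1.length =
    (l.foldl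
        (fun p t =>
          (((PySem.Dict.mk columns_definitions).getD t []).map (·.1)).foldl
            (fun q col_name => (q.1 ++ [t], q.2 ++ [col_name])) p)
        p).2.length := by
  induction l generalizing p with
  | nil => simpa using h
  | cons t ts ih =>
    rw [List.foldl_cons]
    apply ih
    generalize (((PySem.Dict.mk columns_definitions).getD t []).map (·.1)) = ks
    induction ks generalizing p with
    | nil => simpa using h
    | cons k ks ihk => rw [List.foldl_cons]; apply ihk; simp [h]

-- membership in the positions dict = the target pair at that slot
lemma mem_posDict (tp : List (String × String)) (p : String × String) (i : Nat) :
    (i ∈ ((tp.zipIdx).foldl (fun d q => d.modify q.1 [] (· ++ [q.2]))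
        (PySem.Dict.empty : PySem.Dict (String × String) (List Nat))).getD p []) ↔ tp[i]? = some p := by
  rw [PySem.Dict.getD_foldl_modify_append]
  simp only [PySem.Dict.getD_empty, List.nil_append, List.mem_map, List.mem_filter]
  constructor
  · rintro ⟨⟨q, iq⟩, ⟨hmem, hkey⟩, rfl⟩
    have : q = p := by simpa using hkey
    subst this
    exact List.mk_mem_zipIdx_iff_getElem?.mp hmem
  · intro h
    exact ⟨(p, i), ⟨List.mk_mem_zipIdx_iff_getElem?.mpr h, by simp⟩, rfl⟩

-- inner scatter pass: length is preserved
lemma scatter_inner_length (L : List Nat) (j : Int) (m : List Int) :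
    (L.foldl (fun m i => if m.getD i 0 = -1 then m.set i j else m) m).length = m.length := by
  induction L generalizing m with
  | nil => rfl
  | cons i L ih =>
    rw [List.foldl_cons, ih]
    split <;> simp

-- inner scatter pass: fills exactly the still-(-1) slots listed (elementwise)
lemma scatter_inner_getD (L : List Nat) (j : Int) (hj : j ≠ -1) (m : List Int)
    (i0 : Nat) (h : i0 < m.length) :
    (L.foldl (fun m i => if m.getD i 0 = -1 then m.set i j else m) m).getD i0 0 =
      if i0 ∈ L ∧ m.getD i0 0 = -1 then j else m.getD i0 0 := by
  induction L generalizing m with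
  | nil => rw [List.foldl_nil, if_neg (fun hand => List.not_mem_nil hand.1)]
  | cons i L ih =>
    rw [List.foldl_cons]
    by_cases hi : i = i0
    · subst hi
      by_cases hc : m.getD i 0 = -1
      · have hlen' : i < (m.set i j).length := by rw [List.length_set]; exact h
        have hset : (m.set i j).getD i 0 = j := by
          rw [List.getD_eq_getElem _ _ hlen', List.getElem_set, if_pos rfl]
        rw [if_pos hc, ih _ hlen', hset, if_neg (fun hand => hj hand.2),
          if_pos ⟨by simp, hc⟩]
      · rw [if_neg hc, ih _ h, if_neg (fun hand => hc hand.2), if_neg (fun hand => hc hand.2)]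
    · by_cases hc : m.getD i 0 = -1
      · have hlen' : i0 < (m.set i j).length := by rw [List.length_set]; exact h
        have hgd : (m.set i j).getD i0 0 = m.getD i0 0 := by
          rw [List.getD_eq_getElem _ _ hlen', List.getD_eq_getElem _ _ h, List.getElem_set,
            if_neg hi]
        rw [if_pos hc, ih _ hlen', hgd]
        by_cases hm : i0 ∈ L ∧ m.getD i0 0 = -1
        · rw [if_pos hm, if_pos ⟨List.mem_cons_of_mem _ hm.1, hm.2⟩]
        · rw [if_neg hm, if_neg (fun hand =>
            hm ⟨(List.mem_cons.mp hand.1).resolve_left (fun he => hi he.symm), hand.2⟩)]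
      · rw [if_neg hc, ih _ h]
        by_cases hm : i0 ∈ L ∧ m.getD i0 0 = -1
        · rw [if_pos hm, if_pos ⟨List.mem_cons_of_mem _ hm.1, hm.2⟩]
        · rw [if_neg hm, if_neg (fun hand =>
            hm ⟨(List.mem_cons.mp hand.1).resolve_left (fun he => hi he.symm), hand.2⟩)]

-- outer scatter pass: length is preserved
lemma scatter_outer_length (tp : List (String × String)) (sp : List (String × String))
    (j0 : Nat) (m : List Int) :
    ((sp.zipIdx j0).foldl (fun m jp =>
        ((((tp.zipIdx).foldl (fun d q => d.modify q.1 [] (· ++ [q.2]))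
            (PySem.Dict.empty : PySem.Dict (String × String) (List Nat))).getD jp.1 []).foldl
          (fun m i => if m.getD i 0 = -1 then m.set i ((jp.2 : Nat) : Int) else m) m)) m).length
      = m.length := by
  induction sp generalizing j0 m with
  | nil => rfl
  | cons p sp ih =>
    rw [List.zipIdx_cons, List.foldl_cons, ih, scatter_inner_length]

-- outer scatter pass: each slot gets the first matching source index (elementwise)
lemma scatter_outer_getD (tp : List (String × String)) (sp : List (String × String))
    (j0 : Nat) (m : List Int) (hm : m.length = tp.length) (i0 : Nat) (h : i0 < tp.length) :
    ((sp.zipIdx j0).foldl (fun m jp =>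
        ((((tp.zipIdx).foldl (fun d q => d.modify q.1 [] (· ++ [q.2]))
            (PySem.Dict.empty : PySem.Dict (String × String) (List Nat))).getD jp.1 []).foldl
          (fun m i => if m.getD i 0 = -1 then m.set i ((jp.2 : Nat) : Int) else m) m)) m).getD i0 0
      = if m.getD i0 0 = -1 then
          (sp.findIdx? (fun q => q == tp[i0])).elim (-1 : Int) (fun j => ((j0 + j : Nat) : Int))
        else m.getD i0 0 := by
  induction sp generalizing j0 m with
  | nil =>
    rw [List.zipIdx_nil, List.foldl_nil, List.findIdx?_nil]
    by_cases hc : m.getD i0 0 = -1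
    · rw [if_pos hc, hc]; rfl
    · rw [if_neg hc]
  | cons p sp ih =>
    rw [List.zipIdx_cons, List.foldl_cons]
    have hmem := mem_posDict tp p i0
    have hinner := scatter_inner_getD
      ((((tp.zipIdx).foldl (fun d q => d.modify q.1 [] (· ++ [q.2]))
          (PySem.Dict.empty : PySem.Dict (String × String) (List Nat))).getD p []))
      ((j0 : Nat) : Int) (by omega) m i0 (by omega)
    have hilen := scatter_inner_length
      ((((tp.zipIdx).foldl (fun d q => d.modify q.1 [] (· ++ [q.2]))
          (PySem.Dict.empty : PySem.Dict (String × String) (List Nat))).getD p []))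
      ((j0 : Nat) : Int) m
    have hget : tp[i0]? = some tp[i0] := List.getElem?_eq_getElem h
    by_cases hp : tp[i0] = p
    · have hin : i0 ∈ (((tp.zipIdx).foldl (fun d q => d.modify q.1 [] (· ++ [q.2]))
          (PySem.Dict.empty : PySem.Dict (String × String) (List Nat))).getD p []) := by
        rw [hmem, hget, hp]
      have hbeq : (p == tp[i0]) = true := by simp [hp]
      by_cases hc : m.getD i0 0 = -1
      · rw [if_pos ⟨hin, hc⟩] at hinner
        rw [ih (j0 + 1) _ (by rw [hilen]; exact hm), hinner,
          if_neg (show ¬((j0 : Nat) : Int) = -1 by omega), if_pos hc, List.findIdx?_cons]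
        simp [hbeq]
      · rw [if_neg (fun hand => hc hand.2)] at hinner
        rw [ih (j0 + 1) _ (by rw [hilen]; exact hm), hinner, if_neg hc, if_neg hc]
    · have hnin : i0 ∉ (((tp.zipIdx).foldl (fun d q => d.modify q.1 [] (· ++ [q.2]))
          (PySem.Dict.empty : PySem.Dict (String × String) (List Nat))).getD p []) := by
        rw [hmem, hget]; simp [hp]
      have hbeq : (p == tp[i0]) = false := by
        rw [beq_eq_false_iff_ne]; exact fun he => hp he.symm
      by_cases hc : m.getD i0 0 = -1
      · rw [if_neg (fun hand => hnin hand.1)] at hinner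
        rw [ih (j0 + 1) _ (by rw [hilen]; exact hm), hinner, if_pos hc, if_pos hc,
          List.findIdx?_cons]
        simp only [hbeq, Bool.false_eq_true, if_false]
        cases hf : sp.findIdx? (fun q => q == tp[i0]) with
        | none => rfl
        | some j => simp only [Option.map_some, Option.elim_some]; omega
      · rw [if_neg (fun hand => hc hand.2)] at hinner
        rw [ih (j0 + 1) _ (by rw [hilen]; exact hm), hinner, if_neg hc, if_neg hc]

-- the per-target scan map equals the grouped scatter pass
lemma map_scan_eq_scatter (sp : List (String × String)) (tt th : List String)
    (hlen : tt.length = th.length) :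
    (List.range th.length).map (fun i =>
      ((sp.findIdx? (fun pair => pair == ((tt.getD i "", th.getD i "") : String × String))).elim
        (-1 : Int) (fun j => (j : Int)))) =
    (sp.zipIdx).foldl (fun m jp =>
        (((((tt.zip th).zipIdx).foldl (fun d q => d.modify q.1 [] (· ++ [q.2]))
            (PySem.Dict.empty : PySem.Dict (String × String) (List Nat))).getD jp.1 []).foldl
          (fun m i => if m.getD i 0 = -1 then m.set i ((jp.2 : Nat) : Int) else m) m))
      (List.replicate th.length (-1 : Int)) := by
  have htp : (tt.zip th).length = th.length := by simp [List.length_zip]; omega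
  apply List.ext_getElem
  · rw [scatter_outer_length]; simp
  · intro i h1 h2
    have hi : i < th.length := by simpa using h1
    simp only [List.getElem_map, List.getElem_range]
    rw [← List.getD_eq_getElem _ 0 h2,
      scatter_outer_getD (tt.zip th) sp 0 _ (by simp [htp]) i (by omega)]
    have hrep : (List.replicate th.length (-1 : Int)).getD i 0 = -1 := by
      rw [List.getD_eq_getElem _ _ (by simpa using hi)]
      simp
    rw [hrep, if_pos rfl]
    have hz : ((tt.zip th)[i]'(by omega) : String × String) = (tt.getD i "", th.getD i "") := by
      rw [List.getElem_zip, List.getD_eq_getElem _ _ (by omega), List.getD_eq_getElem _ _ hi]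
    rw [← hz]
    cases hf : sp.findIdx? (fun q => q == ((tt.zip th)[i]'(by omega) : String × String)) with
    | none => rfl
    | some j => simp only [Option.elim_some]; omega

-- ===== VERDICT (by name: the statement is the Claim_ definition above) =====
theorem expand_structure_spec : Claim_equal_expand_structure := by
  intro cd matrix inc _ hpre
  obtain ⟨hlen, hmd⟩ := hpre
  match matrix with
  | src_tables :: src_headers :: rest =>
    unfold Spec_expand_structure expand_structure expand_structure_alt
    rw [if_neg (show ¬ (src_tables :: src_headers :: rest).length < 2 by simp)]
    simp only [List.getD_cons_zero, List.getD_cons_succ]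
    have hbase := targets_len_eq cd
      (List.foldl (fun acc t => if (!acc.contains t && (PySem.Dict.mk cd).contains t) = true
        then acc ++ [t] else acc) [] src_tables) ([], []) rfl
    have hsp : (List.range (min src_tables.length src_headers.length)).map
        (fun i => (src_tables.getD i "", src_headers.getD i "")) = src_tables.zip src_headers := by
      have := rangeMin_map_eq_zip_map src_tables src_headers (fun p => p)
      simpa using this
    rw [hsp]
    by_cases hmdc : src_headers.contains "MD" = true
    · simp only [hmdc, if_true, Bool.and_true]
      by_cases hinc : inc = true
      · simp only [hinc, if_true]
        refine congrArg _ (congrArg _ ?_)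
        apply map_scan_eq_scatter
        simpa using hbase
      · simp only [hinc, Bool.false_eq_true, if_false]
        refine congrArg _ (congrArg _ ?_)
        exact map_scan_eq_scatter _ _ _ hbase
    · simp only [hmdc, Bool.and_false, Bool.false_eq_true, if_false]
      refine congrArg _ (congrArg _ ?_)
      exact map_scan_eq_scatter _ _ _ hbase
  | [] => exact absurd hlen (by simp)
  | [_] => exact absurd hlen (by simp)
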